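-- pv_equiv track=rewrite | github.com/yxicun89/AtcoderWA | submissions_typical90_x_gpt/submission_85.py | pm1
-- ===== SOURCE A (Python) =====
-- def pm1(a, b, c):
--
--     while a != b:
--
--         if a < b:
--
--             a += 1
--
--             c += 1
--
--         else:
--
--             a -= 1
--
--             c += 1
--
--     return a, c
-- ===== SOURCE B (Python) =====
-- def pm1(a, b, c):
--     # Closed form: each loop iteration moves a one step toward b and adds 1 to c,
--     # so the loop runs exactly |a - b| times.
--     return b, c + abs(a - b)
-- ===== Notes on version B (the rewrite author's own statement) =====
-- stated objective: faster
-- what changed: Replaces the step-by-step while loop with the closed form (b, c + abs(a-b)).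
import Mathlib
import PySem

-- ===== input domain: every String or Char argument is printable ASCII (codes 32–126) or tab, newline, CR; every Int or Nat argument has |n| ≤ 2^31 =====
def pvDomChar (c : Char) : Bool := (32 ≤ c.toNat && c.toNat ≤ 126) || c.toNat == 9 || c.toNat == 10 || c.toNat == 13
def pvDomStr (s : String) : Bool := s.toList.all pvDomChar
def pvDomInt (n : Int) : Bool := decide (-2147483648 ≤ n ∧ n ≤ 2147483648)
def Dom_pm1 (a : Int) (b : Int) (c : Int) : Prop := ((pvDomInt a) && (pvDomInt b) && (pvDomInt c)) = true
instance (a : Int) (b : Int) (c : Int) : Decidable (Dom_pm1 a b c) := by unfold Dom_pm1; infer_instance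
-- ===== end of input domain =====

-- B replaces the while loop with the closed form [b, c + |a-b|] (faster: O(1) vs O(|a-b|)).
-- ===== PORT A =====
def pm1 (a : Int) (b : Int) (c : Int) : List Int :=
  if a ≠ b then
    if a < b then pm1 (a + 1) b (c + 1)
    else pm1 (a - 1) b (c + 1)
  else [a, c]
termination_by (a - b).natAbs
decreasing_by
  · simp_all; omega
  · simp_all; omega

-- ===== PORT B =====
def pm1_alt (a : Int) (b : Int) (c : Int) : List Int := [b, c + |a - b|]

-- ===== PRECONDITION & SPEC =====
def Spec_pm1 (a : Int) (b : Int) (c : Int) (out : List Int) : Prop := out = pm1_alt a b c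
instance (a : Int) (b : Int) (c : Int) (out : List Int) : Decidable (Spec_pm1 a b c out) := by unfold Spec_pm1; infer_instance

-- ===== CLAIM (what is proved, stated in full; the proofs are below) =====
def Claim_equal_pm1 : Prop := ∀ (a : Int) (b : Int) (c : Int), Dom_pm1 a b c → Spec_pm1 a b c (pm1 a b c)

-- ===== LEMMAS AND PROOFS =====

-- ===== VERDICT (by name: the statement is the Claim_ definition above) =====
theorem pm1_closed (a b c : Int) : pm1 a b c = [b, c + |a - b|] := by
  rw [pm1]
  split_ifs with h1 h2
  · rw [pm1_closed (a + 1) b (c + 1),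
      abs_of_nonpos (by omega : a + 1 - b ≤ 0), abs_of_nonpos (by omega : a - b ≤ 0)]
    congr 1; ring
  · rw [pm1_closed (a - 1) b (c + 1),
      abs_of_nonneg (by omega : 0 ≤ a - 1 - b), abs_of_nonneg (by omega : 0 ≤ a - b)]
    congr 1; ring
  · simp at h1; subst h1; simp
termination_by (a - b).natAbs
decreasing_by
  · omega
  · omega

theorem pm1_spec : Claim_equal_pm1 := by
  intro a b c _
  unfold Spec_pm1 pm1_alt
  exact pm1_closed a b c
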